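-- pv_equiv track=rewrite | github.com/ebisaa944/SOC_Monitoring_Schedule | schedule_app/models.py | generate_pattern_sequence
-- ===== SOURCE A (Python) =====
-- def generate_pattern_sequence(days=365):
--     """Generate pattern sequence for a number of days"""
--     em_sequence = []
--     dm_sequence = []
--
--     for day in range(days):
--         em_index = day % 4
--         dm_index = (em_index + 3) % 4
--         em_sequence.append(em_index)
--         dm_sequence.append(dm_index)
--
--     return em_sequence, dm_sequence
-- ===== SOURCE B (Python) =====
-- def generate_pattern_sequence(days=365):
--     """Generate pattern sequence for a number of days"""
--     em_base = [0, 1, 2, 3]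
--     dm_base = [3, 0, 1, 2]
--     n = max(days, 0)
--     reps = n // 4 + 1
--     return (em_base * reps)[:n], (dm_base * reps)[:n]
-- ===== Notes on version B (the rewrite author's own statement) =====
-- stated objective: idiomatic
-- what changed: Replaces the per-day loop computing day%4 with tiling two fixed period-4 base patterns (list repetition) and slicing to max(days,0) elements.
import Mathlib
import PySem

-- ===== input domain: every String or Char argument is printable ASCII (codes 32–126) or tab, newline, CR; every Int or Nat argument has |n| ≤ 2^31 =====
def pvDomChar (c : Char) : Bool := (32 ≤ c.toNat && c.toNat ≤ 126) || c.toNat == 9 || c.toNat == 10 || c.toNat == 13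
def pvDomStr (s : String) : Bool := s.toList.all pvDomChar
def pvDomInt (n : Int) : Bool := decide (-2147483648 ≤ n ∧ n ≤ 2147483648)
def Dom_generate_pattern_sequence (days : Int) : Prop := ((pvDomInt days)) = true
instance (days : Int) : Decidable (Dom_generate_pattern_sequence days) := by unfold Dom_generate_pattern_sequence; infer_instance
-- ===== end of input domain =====

-- B tiles two fixed period-4 base patterns and slices, instead of A's per-day loop computing day % 4 (objective: idiomatic).

-- ===== PORT A =====
-- Python's list.append is O(1): the two sequence accumulators are ported as Array with push.
def generate_pattern_sequence (days : Int) : List Int × List Int :=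
  let st := (PySem.List.pyRange 0 days 1).foldl
    (fun (p : Array Int × Array Int) day =>
      let em_index := PySem.Int.mod day 4
      let dm_index := PySem.Int.mod (em_index + 3) 4
      (p.1.push em_index, p.2.push dm_index))
    (#[], #[])
  (st.1.toList, st.2.toList)

-- ===== PORT B =====
def generate_pattern_sequence_alt (days : Int) : List Int × List Int :=
  let em_base : List Int := [0, 1, 2, 3]
  let dm_base : List Int := [3, 0, 1, 2]
  let n : Int := max days 0
  let reps : Nat := (PySem.Int.floordiv n 4 + 1).toNat
  ((List.replicate reps em_base).flatten.take n.toNat,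
   (List.replicate reps dm_base).flatten.take n.toNat)

-- ===== PRECONDITION & SPEC =====
def Spec_generate_pattern_sequence (days : Int) (out : List Int × List Int) : Prop := out = generate_pattern_sequence_alt days
instance (days : Int) (out : List Int × List Int) : Decidable (Spec_generate_pattern_sequence days out) := by unfold Spec_generate_pattern_sequence; infer_instance

-- ===== CLAIM (what is proved, stated in full; the proofs are below) =====
def Claim_equal_generate_pattern_sequence : Prop := ∀ (days : Int), Dom_generate_pattern_sequence days → Spec_generate_pattern_sequence days (generate_pattern_sequence days)

-- ===== LEMMAS AND PROOFS =====

-- A's foldl pushes one element onto each component per day: it is a pair of maps.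
theorem foldl_push_pair (f g : Int → Int) :
    ∀ (l : List Int) (acc : Array Int × Array Int),
      (((l.foldl (fun (p : Array Int × Array Int) day => (p.1.push (f day), p.2.push (g day))) acc).1.toList),
       ((l.foldl (fun (p : Array Int × Array Int) day => (p.1.push (f day), p.2.push (g day))) acc).2.toList))
        = (acc.1.toList ++ l.map f, acc.2.toList ++ l.map g) := by
  intro l
  induction l with
  | nil => intro acc; simp
  | cons x xs ih => intro acc; rw [List.foldl_cons, ih]; simp

-- Taking n ≤ 4*r elements of r copies of a 4-element tile reads the tile cyclically.
theorem tile_take (a b c d : Int) :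
    ∀ (r n : Nat), n ≤ 4 * r →
      (List.replicate r [a, b, c, d]).flatten.take n
        = (List.range n).map (fun k => [a, b, c, d].getD (k % 4) 0) := by
  intro r
  induction r with
  | zero => intro n hn; interval_cases n; simp
  | succ r ih =>
    intro n hn
    rw [List.replicate_succ, List.flatten_cons]
    by_cases h4 : n ≤ 4
    · interval_cases n <;> simp [List.range_succ]
    · obtain ⟨m, rfl⟩ : ∃ m, n = 4 + m := ⟨n - 4, by omega⟩
      rw [show (4 : Nat) + m = [a,b,c,d].length + m by simp, List.take_append,
          List.range_add, List.map_append]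
      have hlen : ([a, b, c, d] : List Int).length = 4 := by simp
      rw [hlen]
      congr 1
      · simp [List.range_succ]
      · rw [show 4 + m - 4 = m by omega, ih m (by omega), List.map_map]
        refine List.map_congr_left (fun k _ => ?_)
        simp [Nat.add_mod_left]

theorem mod4_em (k : Nat) :
    PySem.Int.mod (k : Int) 4 = [0, 1, 2, 3].getD (k % 4) (0 : Int) := by
  rw [PySem.Int.mod_eq_emod_of_pos (by norm_num : (0:Int) < 4)]
  have : k % 4 = 0 ∨ k % 4 = 1 ∨ k % 4 = 2 ∨ k % 4 = 3 := by omega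
  rcases this with h' | h' | h' | h' <;>
    · have hc : (k : Int) % 4 = (k % 4 : Nat) := by omega
      rw [hc, h']; simp

theorem mod4_dm (k : Nat) :
    PySem.Int.mod (PySem.Int.mod (k : Int) 4 + 3) 4
      = [3, 0, 1, 2].getD (k % 4) (0 : Int) := by
  rw [PySem.Int.mod_eq_emod_of_pos (by norm_num : (0:Int) < 4),
      PySem.Int.mod_eq_emod_of_pos (by norm_num : (0:Int) < 4)]
  have : k % 4 = 0 ∨ k % 4 = 1 ∨ k % 4 = 2 ∨ k % 4 = 3 := by omega
  rcases this with h' | h' | h' | h' <;>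
    · have hc : (k : Int) % 4 = (k % 4 : Nat) := by omega
      rw [hc, h']; decide

theorem reps_eq (m : Nat) :
    (PySem.Int.floordiv (m : Int) 4 + 1).toNat = m / 4 + 1 := by
  rw [show ((4 : Int)) = ((4 : Nat) : Int) by norm_num, PySem.Int.floordiv_natCast]
  omega

theorem alt_eq (days : Int) :
    generate_pattern_sequence_alt days
      = ((List.range days.toNat).map (fun k => [0,1,2,3].getD (k % 4) (0:Int)),
         (List.range days.toNat).map (fun k => [3,0,1,2].getD (k % 4) (0:Int))) := by
  unfold generate_pattern_sequence_alt
  have hmax : (max days 0).toNat = days.toNat := by omega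
  have hmax' : max days 0 = ((days.toNat : Int)) := by omega
  rw [hmax']
  simp only [Int.toNat_natCast, reps_eq]
  rw [tile_take 0 1 2 3 _ _ (by omega), tile_take 3 0 1 2 _ _ (by omega)]

-- ===== VERDICT (by name: the statement is the Claim_ definition above) =====
theorem generate_pattern_sequence_spec : Claim_equal_generate_pattern_sequence := by
  intro days _
  unfold Spec_generate_pattern_sequence
  simp only [generate_pattern_sequence]
  rw [foldl_push_pair (fun day => PySem.Int.mod day 4)
        (fun day => PySem.Int.mod (PySem.Int.mod day 4 + 3) 4),
      alt_eq, PySem.List.pyRange_one]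
  simp only [List.nil_append, Int.sub_zero, List.map_map,
    Function.comp_def, zero_add]
  refine Prod.ext ?_ ?_ <;>
    exact List.map_congr_left (fun k _ => by first | exact mod4_em k | exact mod4_dm k)
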